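-- pv_equiv track=rewrite | github.com/reetunehra/coffeshop-mca-project | python_code/api/agents/utilis.py | ensure_alternating_roles
-- ===== SOURCE A (Python) =====
-- def ensure_alternating_roles(messages):
--     """
--     After the system prompt, messages must alternate user/assistant/user/assistant...
--     This function auto-fixes if roles do not alternate perfectly.
--     """
--     roles = [m["role"] for m in messages]
--     if not roles:
--         return messages
--
--     # After system, expected alternating roles
--     expected_roles = ["user", "assistant"] * (len(messages) // 2 + 1)
--     expected_roles = expected_roles[: len(messages)]
--
--     fixed_messages = [messages[0]]  # keep the system message
--
--     # Start alternation after system prompt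
--     idx = 1
--     last_role = None
--     for msg in messages[1:]:
--         role = msg["role"]
--         if role == last_role:
--             # Skip duplicate roles, only keep alternating ones
--             continue
--         fixed_messages.append(msg)
--         last_role = role
--
--     return fixed_messages
-- ===== SOURCE B (Python) =====
-- def ensure_alternating_roles(messages):
--     """
--     Keep the system message and the first message after it, then drop any
--     message whose role equals its immediate predecessor's role: a stateless
--     pairwise (zip-based) filter instead of A's last_role accumulator loop.
--     """
--     if not messages:
--         return messages
--     roles = [m["role"] for m in messages]
--     return messages[:2] + [
--         msg
--         for r_prev, r, msg in zip(roles[1:], roles[2:], messages[2:])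
--         if r != r_prev
--     ]
-- ===== Notes on version B (the rewrite author's own statement) =====
-- stated objective: simpler
-- what changed: Replaces A's stateful last_role accumulator loop (and its dead expected_roles table) with a stateless pairwise filter: zip each message with its predecessor's role and keep it iff the roles differ.
import Mathlib
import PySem

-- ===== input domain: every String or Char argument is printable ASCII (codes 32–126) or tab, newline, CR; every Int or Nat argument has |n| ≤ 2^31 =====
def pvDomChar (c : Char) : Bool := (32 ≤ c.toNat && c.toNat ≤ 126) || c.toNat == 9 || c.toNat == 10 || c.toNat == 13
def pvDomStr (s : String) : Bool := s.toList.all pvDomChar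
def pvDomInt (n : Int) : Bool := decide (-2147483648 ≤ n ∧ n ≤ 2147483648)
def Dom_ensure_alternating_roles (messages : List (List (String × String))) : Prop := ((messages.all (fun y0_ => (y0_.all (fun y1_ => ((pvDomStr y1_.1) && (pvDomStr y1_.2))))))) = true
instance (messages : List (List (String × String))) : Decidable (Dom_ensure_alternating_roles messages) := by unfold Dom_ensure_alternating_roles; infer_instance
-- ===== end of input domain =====

-- B keeps the system message and the first message after it, then filters each later
-- message by comparing its role with its immediate predecessor's role (a stateless
-- zip-based pairwise filter), instead of A's last_role accumulator loop. Same output.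

-- ===== PORT A =====
-- m["role"]: first-match association-list lookup; Pre_ guarantees the key is present,
-- so the "" default of getD is never reached on admitted inputs.
def pvRoleA (m : List (String × String)) : String :=
  ((m.find? (fun p => p.1 == "role")).map (·.2)).getD ""

def ensure_alternating_roles (messages : List (List (String × String))) : List (List (String × String)) :=
  let roles := messages.map pvRoleA
  if roles = [] then messages
  else
    -- expected_roles is computed and never used in the Python; kept for fidelity
    let expected_roles := (List.replicate (messages.length / 2 + 1) ["user", "assistant"]).flatten
    let _expected_roles := expected_roles.take messages.length
    -- fixed_messages = [messages[0]]; loop over messages[1:] with last_role : Option String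
    let st := (messages.drop 1).foldl
      (fun (st : List (List (String × String)) × Option String) msg =>
        let role := pvRoleA msg
        if some role = st.2 then st
        else (st.1 ++ [msg], some role))
      (messages.take 1, none)
    st.1

-- ===== PORT B =====
def pvRoleB (m : List (String × String)) : String :=
  ((m.find? (fun p => p.1 == "role")).map (·.2)).getD ""

def ensure_alternating_roles_alt (messages : List (List (String × String))) : List (List (String × String)) :=
  if messages = [] then messages
  else
    let roles := messages.map pvRoleB
    -- messages[:2] = take 2 (slice with nonnegative bound); zip over (roles[1:], roles[2:], messages[2:])
    messages.take 2 ++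
      (((roles.drop 1).zip ((roles.drop 2).zip (messages.drop 2))).filter
        (fun p => p.2.1 ≠ p.1)).map (fun p => p.2.2)

-- ===== PRECONDITION & SPEC =====
-- Pre_: every message dict has a "role" key; otherwise the Python A raises KeyError.
def Pre_ensure_alternating_roles (messages : List (List (String × String))) : Prop :=
  ∀ m ∈ messages, (m.find? (fun p => p.1 == "role")).isSome

instance (messages : List (List (String × String))) : Decidable (Pre_ensure_alternating_roles messages) := by
  unfold Pre_ensure_alternating_roles; infer_instance

def pvWitness_ensure_alternating_roles : (List (List (String × String))) :=
  [[("role", "system")], [("role", "user")], [("role", "user")], [("role", "assistant")]]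

def Spec_ensure_alternating_roles (messages : List (List (String × String))) (out : List (List (String × String))) : Prop := out = ensure_alternating_roles_alt messages
instance (messages : List (List (String × String))) (out : List (List (String × String))) : Decidable (Spec_ensure_alternating_roles messages out) := by unfold Spec_ensure_alternating_roles; infer_instance

-- ===== CLAIM (what is proved, stated in full; the proofs are below) =====
def Claim_equal_ensure_alternating_roles : Prop := ∀ (messages : List (List (String × String))), Dom_ensure_alternating_roles messages → Pre_ensure_alternating_roles messages → Spec_ensure_alternating_roles messages (ensure_alternating_roles messages)

-- ===== LEMMAS AND PROOFS =====

-- the common reference form: drop a message iff its role equals the last kept role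
def pvDedup (r : String) : List (List (String × String)) → List (List (String × String))
  | [] => []
  | m :: rest => if pvRoleA m = r then pvDedup r rest else m :: pvDedup (pvRoleA m) rest

-- A's fold with last_role = some r produces acc ++ pvDedup r tail
lemma foldA_eq_dedup (tail : List (List (String × String)))
    (acc : List (List (String × String))) (r : String) :
    (tail.foldl
      (fun (st : List (List (String × String)) × Option String) msg =>
        let role := pvRoleA msg
        if some role = st.2 then st
        else (st.1 ++ [msg], some role))
      (acc, some r)).1 = acc ++ pvDedup r tail := by
  induction tail generalizing acc r with
  | nil => simp [pvDedup]
  | cons m rest ih =>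
    simp only [List.foldl, pvDedup]
    by_cases h : pvRoleA m = r
    · simp [h, ih]
    · simp [h, ih, List.append_assoc]

-- B's zip-filter-map over (r :: roles of rest, roles of rest, rest) is pvDedup r rest
lemma zipB_eq_dedup (rest : List (List (String × String))) (r : String) :
    ((((r :: rest.map pvRoleA).zip ((rest.map pvRoleA).zip rest)).filter
        (fun p => p.2.1 ≠ p.1)).map (fun p => p.2.2)) = pvDedup r rest := by
  induction rest generalizing r with
  | nil => simp [pvDedup]
  | cons m rest' ih =>
    simp only [List.map_cons, List.zip_cons_cons, List.filter_cons, pvDedup]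
    by_cases h : pvRoleA m = r
    · simpa [h] using ih (pvRoleA m)
    · simpa [h, Ne.symm h] using ih (pvRoleA m)

-- ===== VERDICT (by name: the statement is the Claim_ definition above) =====
theorem ensure_alternating_roles_spec : Claim_equal_ensure_alternating_roles := by
  intro messages _ _
  unfold Spec_ensure_alternating_roles ensure_alternating_roles ensure_alternating_roles_alt
  match messages with
  | [] => simp
  | [m0] => simp
  | m0 :: m1 :: rest =>
    have hB : pvRoleB = pvRoleA := rfl
    simp [hB, foldA_eq_dedup]
    simpa using (zipB_eq_dedup rest (pvRoleA m1)).symm
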